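-- pv_equiv track=rewrite | github.com/nighthaven/adventofcode2024 | day2/part2/day2_part2.py | is_sorted_with_one_intruder
-- ===== SOURCE A (Python) =====
-- def is_sorted_with_one_intruder(liste):
--     intrus = 0
--     for i in range(len(liste)):
--         check_list = liste[:]
--         del check_list[i]
--         if check_list == sorted(check_list):
--             continue
--         intrus += 1
--     if intrus > 1:
--         return False
--     return True
-- ===== SOURCE B (Python) =====
-- def is_sorted_with_one_intruder(liste):
--     n = len(liste)
--     # suf[i] is True iff liste[i:] is non-decreasing (one backward pass)
--     suf = [True] * (n + 1)
--     for i in range(n - 2, -1, -1):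
--         suf[i] = liste[i] <= liste[i + 1] and suf[i + 1]
--     fails = 0
--     pref_ok = True  # liste[:i] is non-decreasing
--     for i in range(n):
--         ok = (pref_ok
--               and (i + 1 >= n or suf[i + 1])
--               and (i == 0 or i + 1 >= n or liste[i - 1] <= liste[i + 1]))
--         if not ok:
--             fails += 1
--         if i > 0 and liste[i - 1] > liste[i]:
--             pref_ok = False
--     return fails <= 1
-- ===== Notes on version B (the rewrite author's own statement) =====
-- stated objective: faster
-- what changed: A deletes each index from a copy and compares it with a fresh sort (O(n^2 log n)); B makes one backward pass of suffix-sorted flags and one forward pass that decides each deletion in O(1), counting failures the same way.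
import Mathlib
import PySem

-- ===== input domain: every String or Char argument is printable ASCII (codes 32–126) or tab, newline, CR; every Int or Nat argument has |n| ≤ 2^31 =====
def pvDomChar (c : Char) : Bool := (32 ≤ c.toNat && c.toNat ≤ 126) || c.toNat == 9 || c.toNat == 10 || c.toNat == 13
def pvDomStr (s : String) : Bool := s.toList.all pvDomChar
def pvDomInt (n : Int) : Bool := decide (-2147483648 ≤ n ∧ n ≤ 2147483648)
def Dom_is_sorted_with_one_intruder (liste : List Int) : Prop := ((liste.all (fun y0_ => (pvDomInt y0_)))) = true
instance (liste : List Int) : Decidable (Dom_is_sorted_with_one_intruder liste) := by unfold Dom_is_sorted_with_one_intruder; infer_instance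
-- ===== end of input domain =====

-- B replaces A's "for every index, copy the list, delete index, compare with a fresh sort" scan
-- by one backward pass of suffix-sorted flags and one forward pass testing each deletion in O(1).

-- ===== PORT A =====
-- for each i: copy, delete index i, compare with sorted copy; count failures; True iff ≤ 1
def is_sorted_with_one_intruder (liste : List Int) : Bool :=
  let intrus : Int :=
    (PySem.List.pyRange 0 (liste.length : Int) 1).foldl
      (fun intrus i =>
        let check_list := liste.eraseIdx i.toNat   -- liste[:] then del check_list[i]; i ∈ range(len) so in range
        if check_list = PySem.List.sorted check_list (fun x => x) false then intrus
        else intrus + 1) 0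
  if intrus > 1 then false else true

-- ===== PORT B =====
-- suffix flags of Source B: sufB l = [suf[0], …, suf[n]] where suf[i] = "l[i:] non-decreasing"
-- (the backward index loop of Source B rendered as structural recursion on the list)
def sufB : List Int → List Bool
  | [] => [true]
  | [_] => [true, true]
  | x :: y :: t => (decide (x ≤ y) && (sufB (y :: t)).headD true) :: sufB (y :: t)

-- Source B's condition "i == 0 or i+1 >= n or liste[i-1] <= liste[i+1]" (prev = liste[i-1], rest = liste[i+1:])
def boundOk (prev : Option Int) (rest : List Int) : Bool :=
  match prev, rest with
  | some p, y :: _ => decide (p ≤ y)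
  | _, _ => true

-- Source B's prefix update "if i > 0 and liste[i-1] > liste[i]: pref_ok = False"
def prevOk (prev : Option Int) (x : Int) : Bool :=
  match prev with
  | some p => decide (p ≤ x)
  | none => true

-- forward loop of Source B: prev = liste[i-1], prefOk = "liste[:i] non-decreasing", flags aligned so
-- flags.headD true = suf[i+1]; counts indices whose deletion leaves the list unsorted
def loopB (prev : Option Int) (prefOk : Bool) (fails : Int) :
    List Int → List Bool → Int
  | [], _ => fails
  | x :: rest, flags =>
    let ok := prefOk && (rest.isEmpty || flags.headD true) && boundOk prev rest
    let fails' := if ok then fails else fails + 1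
    loopB (some x) (prefOk && prevOk prev x) fails' rest flags.tail

def is_sorted_with_one_intruder_alt (liste : List Int) : Bool :=
  decide (loopB none true 0 liste (sufB liste).tail ≤ 1)

-- ===== PRECONDITION & SPEC =====
def Spec_is_sorted_with_one_intruder (liste : List Int) (out : Bool) : Prop := out = is_sorted_with_one_intruder_alt liste
instance (liste : List Int) (out : Bool) : Decidable (Spec_is_sorted_with_one_intruder liste out) := by unfold Spec_is_sorted_with_one_intruder; infer_instance

-- ===== CLAIM (what is proved, stated in full; the proofs are below) =====
def Claim_equal_is_sorted_with_one_intruder : Prop := ∀ (liste : List Int), Dom_is_sorted_with_one_intruder liste → Spec_is_sorted_with_one_intruder liste (is_sorted_with_one_intruder liste)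

-- ===== LEMMAS AND PROOFS =====

-- common ground: number of indices in cur whose deletion from pre ++ cur leaves it unsorted
def badCount (pre cur : List Int) : Int :=
  match cur with
  | [] => 0
  | x :: rest =>
    (if List.IsChain (· ≤ ·) (pre ++ rest) then 0 else 1) + badCount (pre ++ [x]) rest

-- Python's `l == sorted(l)` is exactly non-decreasing
theorem eq_sorted_iff_isChain (l : List Int) :
    l = PySem.List.sorted l (fun x => x) false ↔ List.IsChain (· ≤ ·) l := by
  constructor
  · intro h
    rw [List.isChain_iff_pairwise]
    have := PySem.List.sorted_pairwise l (fun x => x)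
    rw [← h] at this
    simpa using this
  · intro h
    rw [List.isChain_iff_pairwise] at h
    exact (PySem.List.sorted_eq_self_of_pairwise l (fun x => x) (by simpa using h)).symm

theorem sufB_headD (l : List Int) :
    (sufB l).headD true = decide (List.IsChain (· ≤ ·) l) := by
  induction l with
  | nil => simp [sufB]
  | cons x t ih =>
    cases t with
    | nil => simp [sufB]
    | cons y t' =>
      simp only [sufB, List.headD_cons, ih, List.isChain_cons_cons]
      by_cases h : x ≤ y <;> simp [h]

theorem sufB_cons (x : Int) (t : List Int) :
    sufB (x :: t) = decide (List.IsChain (· ≤ ·) (x :: t)) :: sufB t := by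
  cases t with
  | nil => simp [sufB]
  | cons y t' =>
    simp only [sufB, sufB_headD, List.isChain_cons_cons]
    by_cases h : x ≤ y <;> simp [h]

theorem loopB_spec (cur pre : List Int) (fails : Int) :
    loopB pre.getLast? (decide (List.IsChain (· ≤ ·) pre)) fails cur (sufB cur).tail
      = fails + badCount pre cur := by
  induction cur generalizing pre fails with
  | nil => simp [loopB, badCount]
  | cons x rest ih =>
    rw [sufB_cons]
    simp only [loopB, List.tail_cons]
    have hok : (decide (List.IsChain (· ≤ ·) pre) && (rest.isEmpty || (sufB rest).headD true) &&
        boundOk pre.getLast? rest)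
        = decide (List.IsChain (· ≤ ·) (pre ++ rest)) := by
      rw [sufB_headD]
      cases hrest : rest with
      | nil =>
        cases hlast : pre.getLast? <;>
          simp [boundOk, List.append_nil]
      | cons y t =>
        cases hlast : pre.getLast? <;>
          simp [boundOk, List.isChain_append, hlast, Bool.and_assoc]
    have hpref : (decide (List.IsChain (· ≤ ·) pre) && prevOk pre.getLast? x)
        = decide (List.IsChain (· ≤ ·) (pre ++ [x])) := by
      cases hlast : pre.getLast? <;>
        simp [prevOk, List.isChain_append, hlast]
    simp only [hok, hpref]
    have hlast' : (pre ++ [x]).getLast? = some x := by simp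
    have h2 := ih (pre ++ [x])
      (if decide (List.IsChain (· ≤ ·) (pre ++ rest)) = true then fails else fails + 1)
    rw [hlast'] at h2
    refine Eq.trans h2 ?_
    simp only [badCount]
    by_cases h : List.IsChain (· ≤ ·) (pre ++ rest) <;> simp [h] <;> ring

theorem foldlA_spec (cur pre : List Int) (acc : Int) :
    (List.range cur.length).foldl
      (fun a k => if List.IsChain (· ≤ ·) (pre ++ cur.eraseIdx k) then a else a + 1) acc
      = acc + badCount pre cur := by
  induction cur generalizing pre acc with
  | nil => simp [badCount]
  | cons x rest ih =>
    rw [List.length_cons, List.range_succ_eq_map, List.foldl_cons, List.foldl_map]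
    refine Eq.trans (List.foldl_ext _
      (fun (a : Int) (k : Nat) =>
        if List.IsChain (· ≤ ·) ((pre ++ [x]) ++ rest.eraseIdx k) then a else a + 1) _ ?_) ?_
    · intro a k _
      simp [List.eraseIdx_cons_succ, List.append_assoc]
    · rw [ih (pre ++ [x])]
      simp only [badCount, List.eraseIdx_cons_zero]
      by_cases h : List.IsChain (· ≤ ·) (pre ++ rest) <;> simp [h] <;> ring

theorem foldlA_nil (liste : List Int) :
    (List.range liste.length).foldl
      (fun (a : Int) (k : Nat) =>
        if liste.eraseIdx k = PySem.List.sorted (liste.eraseIdx k) (fun x => x) false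
        then a else a + 1) 0
      = badCount [] liste := by
  refine Eq.trans (List.foldl_ext _
    (fun (a : Int) (k : Nat) =>
      if List.IsChain (· ≤ ·) ([] ++ liste.eraseIdx k) then a else a + 1) _ ?_) ?_
  · intro a k _
    simp [eq_sorted_iff_isChain]
  · exact (foldlA_spec liste [] 0).trans (zero_add _)

theorem portA_eq (liste : List Int) :
    is_sorted_with_one_intruder liste = decide (badCount [] liste ≤ 1) := by
  unfold is_sorted_with_one_intruder
  rw [PySem.List.pyRange_one]
  simp only [sub_zero, Int.toNat_natCast, List.foldl_map, zero_add]
  have key : ∀ (c : Int), c = badCount [] liste →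
      (if c > 1 then false else true) = decide (badCount [] liste ≤ 1) := by
    intro c hc
    subst hc
    by_cases h : badCount [] liste > 1 <;> simp [h] <;> omega
  exact key _ (foldlA_nil liste)

theorem portB_eq (liste : List Int) :
    is_sorted_with_one_intruder_alt liste = decide (badCount [] liste ≤ 1) := by
  unfold is_sorted_with_one_intruder_alt
  have h := loopB_spec liste [] 0
  simp only [List.getLast?_nil, List.IsChain.nil, decide_true, zero_add] at h
  rw [h]

-- ===== VERDICT (by name: the statement is the Claim_ definition above) =====
theorem is_sorted_with_one_intruder_spec : Claim_equal_is_sorted_with_one_intruder := by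
  intro liste _
  unfold Spec_is_sorted_with_one_intruder
  rw [portA_eq, portB_eq]
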